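-- pv_equiv track=rewrite | github.com/MrBrantCode/unitest_baseline | mut_generate/mist_train_taco/taco_15716/solution.py | calculate_minimum_shelves
-- ===== SOURCE A (Python) =====
-- def calculate_minimum_shelves(book_titles):
--     # Dictionary to count the number of books starting with each letter
--     letter_count = {}
--
--     # Count the number of books starting with each letter
--     for title in book_titles:
--         first_letter = title[0]
--         if first_letter in letter_count:
--             letter_count[first_letter] += 1
--         else:
--             letter_count[first_letter] = 1
--
--     # Calculate the minimum number of shelves required
--     shelf_count = len(letter_count)
--     for count in letter_count.values():
--         if count % 10 == 0:
--             shelf_count += (count // 10) - 1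
--         else:
--             shelf_count += count // 10
--
--     return shelf_count
-- ===== SOURCE B (Python) =====
-- def shelves_for_sorted(letters):
--     # letters is sorted: equal first letters are adjacent; take the leading run,
--     # give it ceil(run/10) shelves, recurse on the remainder.
--     if not letters:
--         return 0
--     c = letters[0]
--     k = 1
--     while k < len(letters) and letters[k] == c:
--         k += 1
--     return -(-k // 10) + shelves_for_sorted(letters[k:])
--
-- def calculate_minimum_shelves(book_titles):
--     letters = sorted(t[0] for t in book_titles)
--     return shelves_for_sorted(letters)
-- ===== Notes on version B (the rewrite author's own statement) =====
-- stated objective: alternative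
-- what changed: Replaces A's dict of per-letter counts plus a second pass over the values by a sort-then-scan: sort the first letters and recursively strip each maximal run, adding ceil(run/10) per run.
import Mathlib
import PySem

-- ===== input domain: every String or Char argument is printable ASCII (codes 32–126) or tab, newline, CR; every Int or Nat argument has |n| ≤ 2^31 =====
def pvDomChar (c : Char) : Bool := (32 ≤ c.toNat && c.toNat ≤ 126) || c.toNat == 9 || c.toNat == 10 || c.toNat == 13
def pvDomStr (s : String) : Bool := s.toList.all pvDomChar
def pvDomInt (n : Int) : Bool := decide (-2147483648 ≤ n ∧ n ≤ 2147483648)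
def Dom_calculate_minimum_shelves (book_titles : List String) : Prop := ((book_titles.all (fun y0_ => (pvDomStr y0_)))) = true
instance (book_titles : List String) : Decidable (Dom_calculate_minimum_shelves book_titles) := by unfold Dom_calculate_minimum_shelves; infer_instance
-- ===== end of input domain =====

-- B replaces A's dict-of-counts with a sort-then-scan over the first letters (alternative algorithm, same values).

-- ===== PORT A =====
-- title[0]; Pre_ excludes the empty title, on which Python raises IndexError (pyGet? = none)
def pvFirst (t : String) : Char := (PySem.Str.pyGet? t 0).getD ' '

def calculate_minimum_shelves (book_titles : List String) : Int :=
  let letter_count : PySem.Dict Char Int :=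
    book_titles.foldl (fun d title =>
      let first_letter := pvFirst title
      if d.contains first_letter then d.modify first_letter 0 (· + 1)
      else d.insert first_letter 1) PySem.Dict.empty
  let shelf_count : Int := letter_count.size
  letter_count.values.foldl (fun acc count =>
    if PySem.Int.mod count 10 = 0 then acc + (PySem.Int.floordiv count 10 - 1)
    else acc + PySem.Int.floordiv count 10) shelf_count

-- ===== PORT B =====
-- the while loop advances k over the leading run of letters equal to letters[0]:
-- k = 1 + (rest.takeWhile (· == c)).length, and letters[k:] = rest.drop (k - 1)
def shelvesForSorted : List Char → Int
  | [] => 0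
  | c :: rest =>
      let run := (rest.takeWhile (· == c)).length;
      -(PySem.Int.floordiv (-(((1 + run : Nat)) : Int)) 10) + shelvesForSorted (rest.drop run)
  termination_by ls => ls.length
  decreasing_by simp

def calculate_minimum_shelves_alt (book_titles : List String) : Int :=
  shelvesForSorted (PySem.List.sorted (book_titles.map pvFirst) (fun c => c) false)

-- ===== PRECONDITION & SPEC =====
-- Pre_ excludes exactly the inputs containing an empty title, on which Python A raises IndexError at title[0].
def Pre_calculate_minimum_shelves (book_titles : List String) : Prop :=
  ∀ t ∈ book_titles, t ≠ ""
instance (book_titles : List String) : Decidable (Pre_calculate_minimum_shelves book_titles) := by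
  unfold Pre_calculate_minimum_shelves; infer_instance

def pvWitness_calculate_minimum_shelves : List String := ["abc", "ant", "bed"]

def Spec_calculate_minimum_shelves (book_titles : List String) (out : Int) : Prop := out = calculate_minimum_shelves_alt book_titles
instance (book_titles : List String) (out : Int) : Decidable (Spec_calculate_minimum_shelves book_titles out) := by unfold Spec_calculate_minimum_shelves; infer_instance

-- ===== CLAIM (what is proved, stated in full; the proofs are below) =====
def Claim_equal_calculate_minimum_shelves : Prop := ∀ (book_titles : List String), Dom_calculate_minimum_shelves book_titles → Pre_calculate_minimum_shelves book_titles → Spec_calculate_minimum_shelves book_titles (calculate_minimum_shelves book_titles)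

-- ===== LEMMAS AND PROOFS =====

-- ceil(n/10), as B computes it
def ceil10 (n : Nat) : Int := -(PySem.Int.floordiv (-(n : Int)) 10)

-- A's per-count adjustment
def adjust10 (n : Int) : Int :=
  if PySem.Int.mod n 10 = 0 then PySem.Int.floordiv n 10 - 1 else PySem.Int.floordiv n 10

lemma one_add_adjust10 (m : Nat) : 1 + adjust10 (m : Int) = ceil10 m := by
  unfold adjust10 ceil10
  rw [PySem.Int.mod_eq_emod_of_pos (by norm_num : (0:Int) < 10),
      PySem.Int.floordiv_eq_ediv_of_pos (by norm_num : (0:Int) < 10),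
      PySem.Int.floordiv_eq_ediv_of_pos (by norm_num : (0:Int) < 10)]
  split_ifs with h <;> omega

lemma a_branch_eq_modify (d : PySem.Dict Char Int) (c : Char) :
    (if d.contains c then d.modify c 0 (· + 1) else d.insert c 1) = d.modify c 0 (· + 1) := by
  by_cases h : d.contains c = true
  · simp [h]
  · have hc : d.contains c = false := by simpa using h
    simp only [hc, if_false, Bool.false_eq_true, PySem.Dict.modify,
      PySem.Dict.getD_of_not_contains d 0 hc]
    norm_num

lemma a_fold_eq_counter (ts : List String) :
    ts.foldl (fun d title =>
      let first_letter := pvFirst title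
      if d.contains first_letter then d.modify first_letter 0 (· + 1)
      else d.insert first_letter 1) PySem.Dict.empty
    = PySem.Dict.counter (ts.map pvFirst) := by
  rw [PySem.Dict.counter_eq_foldl, List.foldl_map]
  exact PySem.List.foldl_congr_mem _ _ _ _ (fun d t _ => a_branch_eq_modify d (pvFirst t))

-- folding Set.add over elements already present does nothing
lemma foldl_add_all_mem (t : List Char) (s : List Char) (h : ∀ x ∈ t, x ∈ s) :
    t.foldl PySem.Set.add s = s := by
  induction t with
  | nil => rfl
  | cons x xs ih =>
      have : PySem.Set.add s x = s := by
        simp [PySem.Set.add, PySem.Set.contains, h x (by simp)]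
      simp only [List.foldl_cons, this]
      exact ih (fun y hy => h y (List.mem_cons_of_mem _ hy))

-- Set.ofList distributes over a head element absent from the tail fold
lemma foldl_add_cons_of_not_mem (l : List Char) (c : Char) (s : List Char) (h : c ∉ l) :
    l.foldl PySem.Set.add (c :: s) = c :: l.foldl PySem.Set.add s := by
  induction l generalizing s with
  | nil => rfl
  | cons x xs ih =>
      have hxc : x ≠ c := fun hx => h (by simp [hx])
      have hadd : PySem.Set.add (c :: s) x = c :: PySem.Set.add s x := by
        simp only [PySem.Set.add, PySem.Set.contains, List.contains_cons]
        have : (x == c) = false := by simpa using hxc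
        rw [this]
        simp only [Bool.false_or]
        split_ifs <;> simp
      simp only [List.foldl_cons, hadd]
      exact ih (PySem.Set.add s x) (fun hm => h (List.mem_cons_of_mem _ hm))

-- the crux: B's run-scan over a sorted list sums ceil10 of the multiplicities
lemma shelvesForSorted_spec (ls : List Char) (h : ls.Pairwise (· ≤ ·)) :
    shelvesForSorted ls = ((PySem.Set.ofList ls).map (fun k => ceil10 (ls.count k))).sum := by
  induction hn : ls.length using Nat.strong_induction_on generalizing ls with
  | _ n ih =>
  match ls, h with
  | [], _ => rw [shelvesForSorted]; simp [PySem.Set.ofList]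
  | c :: rest, h =>
    subst hn
    have hrest : rest.Pairwise (· ≤ ·) := (List.pairwise_cons.mp h).2
    have hcle : ∀ x ∈ rest, c ≤ x := (List.pairwise_cons.mp h).1
    set t := rest.takeWhile (· == c) with ht
    set dr := rest.dropWhile (· == c) with hdr
    have hsplit : rest = t ++ dr := (List.takeWhile_append_dropWhile).symm
    have htc : ∀ x ∈ t, x = c := fun x hx => by
      have := List.mem_takeWhile_imp hx; simpa using this
    have hdp : dr.Pairwise (· ≤ ·) :=
      hrest.sublist (by rw [hsplit]; exact List.sublist_append_right _ _)
    have hdrgt : ∀ x ∈ dr, c < x := by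
      intro x hx
      rcases hd : dr with _ | ⟨e, dr'⟩
      · rw [hd] at hx; cases hx
      · have hne : e ≠ c := by
          have h0 := List.head?_dropWhile_not (· == c) rest
          rw [← hdr, hd] at h0; simpa using h0
        have hec : c < e := by
          have hmem : e ∈ rest := by rw [hsplit, hd]; simp
          rcases lt_or_eq_of_le (hcle e hmem) with h' | h'
          · exact h'
          · exact absurd h'.symm hne
        rw [hd] at hx
        rcases List.mem_cons.mp hx with rfl | hx'
        · exact hec
        · have hdp' := hdp; rw [hd] at hdp'
          exact lt_of_lt_of_le hec ((List.pairwise_cons.mp hdp').1 x hx')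
    have hcnd : c ∉ dr := fun hm => lt_irrefl c (hdrgt c hm)
    have hdrop : rest.drop t.length = dr := by
      conv_lhs => rw [hsplit]
      simp
    have hlen : dr.length < (c :: rest).length := by
      have : dr.length ≤ rest.length := by
        conv_rhs => rw [hsplit]
        simp
      simpa using Nat.lt_succ_of_le this
    -- counts
    have hcountc : (c :: rest).count c = 1 + t.length := by
      have h1 : t.count c = t.length := List.count_eq_length.mpr (fun x hx => by simp [htc x hx])
      have h2 : dr.count c = 0 := List.count_eq_zero.mpr hcnd
      rw [hsplit]
      simp [List.count_append, h1, h2]; omega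
    have hcountk : ∀ k ∈ dr, (c :: rest).count k = dr.count k := by
      intro k hk
      have hkc : k ≠ c := fun he => hcnd (he ▸ hk)
      have h1 : t.count k = 0 := List.count_eq_zero.mpr (fun hm => hkc (htc k hm))
      rw [hsplit]
      simp [List.count_append, h1, Ne.symm hkc]
    -- dedup set
    have hofl : PySem.Set.ofList (c :: rest) = c :: PySem.Set.ofList dr := by
      rw [PySem.Set.ofList_eq_foldl, PySem.Set.ofList_eq_foldl]
      have hstep : ([] : List Char).foldl PySem.Set.add [] = [] := rfl
      have haddc : PySem.Set.add ([] : List Char) c = [c] := rfl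
      calc (c :: rest).foldl PySem.Set.add []
          = (t ++ dr).foldl PySem.Set.add [c] := by rw [List.foldl_cons, haddc, hsplit]
        _ = dr.foldl PySem.Set.add [c] := by
              rw [List.foldl_append, foldl_add_all_mem t [c] (fun x hx => by simp [htc x hx])]
        _ = c :: dr.foldl PySem.Set.add [] := foldl_add_cons_of_not_mem dr c [] hcnd
    -- unfold one step of B
    have hunf : shelvesForSorted (c :: rest) =
        ceil10 (1 + t.length) + shelvesForSorted dr := by
      rw [shelvesForSorted, ← ht, hdrop]; rfl
    rw [hunf, ih dr.length hlen dr hdp rfl, hofl]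
    rw [List.map_cons, List.sum_cons, hcountc]
    congr 1
    apply congrArg
    exact List.map_congr_left (fun k hk => by
      rw [hcountk k ((PySem.Set.mem_ofList _ _).mp hk)])

-- A as a sum over the distinct first letters
lemma a_as_sum (ts : List String) :
    calculate_minimum_shelves ts =
      ((PySem.Set.ofList (ts.map pvFirst)).map
        (fun k => ceil10 ((ts.map pvFirst).count k))).sum := by
  unfold calculate_minimum_shelves
  rw [a_fold_eq_counter]
  set L := ts.map pvFirst with hL
  have hval : (PySem.Dict.counter L).values
      = (PySem.Set.ofList L).map (fun k => (L.count k : Int)) := by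
    show ((PySem.Dict.counter L).items.map (·.2)) = _
    rw [PySem.Dict.items_counter, List.map_map]
    rfl
  have hsize : ((PySem.Dict.counter L).size : Int)
      = ((PySem.Set.ofList L).map (fun _ => (1 : Int))).sum := by
    show (((PySem.Dict.counter L).items.length : Nat) : Int) = _
    rw [PySem.Dict.items_counter, List.length_map, PySem.List.sum_map_const_int]
    ring
  have hfold : ∀ (vs : List Int) (a : Int),
      vs.foldl (fun acc count =>
        if PySem.Int.mod count 10 = 0 then acc + (PySem.Int.floordiv count 10 - 1)
        else acc + PySem.Int.floordiv count 10) a = a + (vs.map adjust10).sum := by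
    intro vs a
    have := PySem.List.foldl_congr_mem
      (f := fun acc count =>
        if PySem.Int.mod count 10 = 0 then acc + (PySem.Int.floordiv count 10 - 1)
        else acc + PySem.Int.floordiv count 10)
      (g := fun acc count => acc + adjust10 count) (l := vs) (init := a)
      (fun acc x _ => by unfold adjust10; dsimp only; split_ifs <;> ring)
    rw [this, PySem.List.foldl_add]
  rw [hfold, hval, hsize, List.map_map, ← PySem.List.sum_map_add_int]
  apply congrArg
  apply List.map_congr_left
  intro k hk
  simpa using one_add_adjust10 (L.count k)

theorem calculate_minimum_shelves_spec : Claim_equal_calculate_minimum_shelves := by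
  intro ts _ _
  unfold Spec_calculate_minimum_shelves calculate_minimum_shelves_alt
  set L := ts.map pvFirst with hL
  set S := PySem.List.sorted L (fun c => c) false with hS
  have hperm : S.Perm L := PySem.List.sorted_perm L _ _
  have hpw : S.Pairwise (· ≤ ·) := by
    have := PySem.List.sorted_pairwise L (fun c => c)
    simpa using this
  rw [a_as_sum]
  have hcount : ∀ k, S.count k = L.count k := fun k => hperm.count_eq k
  have hmemiff : ∀ a, a ∈ PySem.Set.ofList S ↔ a ∈ PySem.Set.ofList L := by
    intro a
    rw [PySem.Set.mem_ofList, PySem.Set.mem_ofList]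
    exact ⟨fun h => hperm.mem_iff.mp h, fun h => hperm.mem_iff.mpr h⟩
  have hsetperm : (PySem.Set.ofList S).Perm (PySem.Set.ofList L) :=
    (List.perm_ext_iff_of_nodup (PySem.Set.nodup_ofList _) (PySem.Set.nodup_ofList _)).mpr hmemiff
  calc ((PySem.Set.ofList L).map (fun k => ceil10 (L.count k))).sum
      = ((PySem.Set.ofList S).map (fun k => ceil10 (L.count k))).sum :=
        ((hsetperm.map _).sum_eq).symm
    _ = ((PySem.Set.ofList S).map (fun k => ceil10 (S.count k))).sum := by
        apply congrArg; exact (List.map_congr_left (fun k _ => by rw [hcount k])).symm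
    _ = shelvesForSorted S := (shelvesForSorted_spec S hpw).symm
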